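-- pv_equiv track=rewrite | github.com/PolloRollo/ProjectEuler | problems.py | problem_047
-- ===== SOURCE A (Python) =====
-- def problem_047(k=4, N=200000):
--     """
--     Find the first k consecutive integers to have k distinct prime factors each.
--     Return the first of these numbers.
--
--     Can I remove the dependence on N?
--     """
--     # Modified prime sieve to count factors
--     factors = [0, 0]
--     factors.extend([1 for _ in range(N-1)])
--     k_factors = set()
--     least_k_streak = 0
--     for prime in range(len(factors)):
--         if factors[prime] == 1:
--             for i in range(2*prime, len(factors), prime):
--                 factors[i] += 1
--         # Find first instance of k-streak
--         elif factors[prime] == k + 1: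
--             k_factors.add(prime)
--             streak = True
--             for i in range(1, k):
--                 if prime - i not in k_factors:
--                     streak = False
--                     break
--             if streak:
--                 least_k_streak = prime - k + 1
--                 break
--     return least_k_streak
-- ===== SOURCE B (Python) =====
-- def problem_047(k=4, N=200000):
--     """
--     Find the first k consecutive integers to have k distinct prime factors each.
--     Return the first of these numbers (0 if there is none up to N).
--     """
--     if N < 2:
--         return 0
--     # smallest-prime-factor table: spf[m] = least prime factor of m for composite m, else 0
--     spf = [0] * (N + 1)
--     p = 2
--     while p * p <= N:
--         if spf[p] == 0:
--             for m in range(p * p, N + 1, p):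
--                 if spf[m] == 0:
--                     spf[m] = p
--         p += 1
--     streak = 0
--     for n in range(2, N + 1):
--         # count distinct prime factors of n by walking the spf chain
--         c = 0
--         m = n
--         while m > 1:
--             q = spf[m]
--             if q == 0:  # m is prime
--                 c += 1
--                 break
--             c += 1
--             while m % q == 0:
--                 m //= q
--         if c == k:
--             streak += 1
--             if streak == k:
--                 return n - k + 1
--         else:
--             streak = 0
--     return 0
-- ===== Notes on version B (the rewrite author's own statement) =====
-- stated objective: alternative
-- what changed: Replaces A's additive omega-counting sieve (an N+1 factor-count array incremented at every multiple of every prime, plus a set of qualifying indices probed backwards for the run test) by a smallest-prime-factor table, an explicit per-number factorization walk, and a running streak counter with early return.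
-- intended difference: For k=1 (any N>=2) A returns 4 (or 0 for N<4) because its sieve marks primes with the sentinel value 1 that collides with the factor count, so the prime 2 never qualifies, while B returns the intended 2; for k=-1 A returns 2 from the untouched 0 entry at index 0 of its array, while B returns 0 since no integer has -1 distinct prime factors. — e.g. on problem_047(1, 10): A returns 4, B returns 2
import Mathlib
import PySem

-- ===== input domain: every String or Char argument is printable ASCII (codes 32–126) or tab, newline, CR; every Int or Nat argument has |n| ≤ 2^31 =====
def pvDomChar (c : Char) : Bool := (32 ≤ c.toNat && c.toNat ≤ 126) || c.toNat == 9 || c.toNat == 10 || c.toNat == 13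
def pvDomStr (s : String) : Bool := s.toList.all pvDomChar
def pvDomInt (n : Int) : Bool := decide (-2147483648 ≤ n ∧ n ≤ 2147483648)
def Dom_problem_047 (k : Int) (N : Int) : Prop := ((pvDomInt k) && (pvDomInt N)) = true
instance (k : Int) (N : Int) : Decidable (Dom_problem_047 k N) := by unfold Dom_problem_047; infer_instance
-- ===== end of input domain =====

-- B replaces A's additive factor-counting sieve and qualifying-index set by a smallest-prime-
-- factor table, per-number factorization walks and a running streak counter (not claimed faster).

-- ===== PORT A =====
-- factors = [0, 0]; factors.extend([1 for _ in range(N-1)]) — Python's list as Array Int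
def pvFactorsInit (N : Int) : Array Int := (([0, 0] : List Int) ++ List.replicate (N - 1).toNat 1).toArray

-- for i in range(2*prime, len(factors), prime): factors[i] += 1
-- (the indices produced by range are nonnegative and in bounds, so Array.modify at i.toNat is exact)
def pvSieveStep (f : Array Int) (p : Nat) : Array Int :=
  (PySem.List.pyRange (2 * (p : Int)) (f.size : Int) (p : Int)).foldl
    (fun g i => g.modify i.toNat (· + 1)) f

-- the main 'for prime in range(len(factors))' loop with its break
-- (factors[prime] with prime from range(len(factors)) is in bounds, so Array.getD is exact)
def pvLoopA (k : Int) : List Nat → Array Int → PySem.Set Int → Int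
  | [], _, _ => 0
  | p :: ps, f, ks =>
    if f.getD p 0 = 1 then
      pvLoopA k ps (pvSieveStep f p) ks
    else if f.getD p 0 = k + 1 then
      let ks' := ks.add (p : Int)
      if (PySem.List.pyRange 1 k 1).all (fun i => ks'.contains ((p : Int) - i)) then
        (p : Int) - k + 1
      else pvLoopA k ps f ks'
    else pvLoopA k ps f ks

def problem_047 (k : Int) (N : Int) : Int :=
  let factors := pvFactorsInit N
  pvLoopA k (List.range factors.size) factors PySem.Set.empty

-- ===== PORT B =====
-- inner "while m % p == 0: m //= p" — fuel-bounded (fuel >= m suffices; the Python loop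
-- terminates exactly when m >= 1 and p >= 2, which holds at every call site)
def pvDivOutF : Nat → Nat → Nat → Nat
  | 0, m, _ => m
  | fuel + 1, m, p => if p ∣ m then pvDivOutF fuel (m / p) p else m

-- "if spf[m] == 0: spf[m] = p" over "for m in range(p*p, N+1, p)"
-- (indices are nonnegative and in bounds, so Array.setIfInBounds at i.toNat is exact)
def pvSpfMark (spf : Array Int) (p NN : Nat) : Array Int :=
  (PySem.List.pyRange ((p * p : Nat) : Int) ((NN + 1 : Nat) : Int) (p : Int)).foldl
    (fun g i => if g.getD i.toNat 0 = 0 then g.setIfInBounds i.toNat (p : Int) else g) spf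

-- "while p * p <= N: …; p += 1" — fuel ≥ N + 2 - p suffices
def pvSpfOuter : Nat → Array Int → Nat → Nat → Array Int
  | 0, spf, _, _ => spf
  | fuel + 1, spf, p, NN =>
    if p * p ≤ NN then
      if spf.getD p 0 = 0 then pvSpfOuter fuel (pvSpfMark spf p NN) (p + 1) NN
      else pvSpfOuter fuel spf (p + 1) NN
    else spf

-- "while m > 1: q = spf[m]; if q == 0: c += 1; break; c += 1; while m % q == 0: m //= q"
-- — fuel ≥ m suffices (m strictly decreases)
def pvWalk : Nat → Array Int → Nat → Nat → Nat
  | 0, _, _, c => c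
  | fuel + 1, spf, m, c =>
    if 1 < m then
      let q := spf.getD m 0
      if q = 0 then c + 1
      else pvWalk fuel spf (pvDivOutF m m q.toNat) (c + 1)
    else c

-- count of distinct prime factors of n read off the spf chain
def pvOmegaSpf (spf : Array Int) (n : Nat) : Nat := pvWalk n spf n 0

-- the "for n in range(2, N+1)" loop with streak counter and early return
def pvLoopB (k : Int) (spf : Array Int) : List Int → Int → Int
  | [], _ => 0
  | n :: rest, streak =>
    if (pvOmegaSpf spf n.toNat : Int) = k then
      if streak + 1 = k then n - k + 1
      else pvLoopB k spf rest (streak + 1)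
    else pvLoopB k spf rest 0

def problem_047_alt (k : Int) (N : Int) : Int :=
  if N < 2 then 0
  else
    let spf := pvSpfOuter (N.toNat + 2) (Array.replicate (N.toNat + 1) 0) 2 N.toNat
    pvLoopB k spf (PySem.List.pyRange 2 (N + 1) 1) 0

-- ===== PRECONDITION & SPEC =====
-- For k = 1 A's sieve marks primes with the sentinel 1 that collides with the factor count, so A
-- returns 4 (first composite prime power) instead of the intended 2; for k = -1 A accidentally
-- returns 2 from the untouched 0 entry of the sieve; B returns the intended first-run answer
-- (2 for k = 1 with N ≥ 2, and 0 for k = -1, where no integer has -1 distinct prime factors).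
def D_problem_047 (k : Int) (N : Int) : Prop := k = -1 ∨ (k = 1 ∧ 2 ≤ N)
instance (k : Int) (N : Int) : Decidable (D_problem_047 k N) := by unfold D_problem_047; infer_instance

def Spec_problem_047 (k : Int) (N : Int) (out : Int) : Prop :=
  ¬ D_problem_047 k N → out = problem_047_alt k N
instance (k : Int) (N : Int) (out : Int) : Decidable (Spec_problem_047 k N out) := by
  unfold Spec_problem_047; infer_instance

def pvDiffWitness_problem_047 : Int × Int := (1, 10)
def pvDiffWitnessOut_problem_047 : Int × Int := (4, 2)

-- ===== CLAIM (what is proved, stated in full; the proofs are below) =====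
def Claim_unchanged_problem_047 : Prop :=
  ∀ (k : Int) (N : Int), Dom_problem_047 k N → Spec_problem_047 k N (problem_047 k N)
def Claim_changed_problem_047 : Prop :=
  Dom_problem_047 (pvDiffWitness_problem_047.1) (pvDiffWitness_problem_047.2) ∧
  D_problem_047 (pvDiffWitness_problem_047.1) (pvDiffWitness_problem_047.2) ∧
  problem_047 (pvDiffWitness_problem_047.1) (pvDiffWitness_problem_047.2) = pvDiffWitnessOut_problem_047.1 ∧
  problem_047_alt (pvDiffWitness_problem_047.1) (pvDiffWitness_problem_047.2) = pvDiffWitnessOut_problem_047.2 ∧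
  pvDiffWitnessOut_problem_047.1 ≠ pvDiffWitnessOut_problem_047.2
def Claim_exact_problem_047 : Prop :=
  ∀ (k : Int) (N : Int), Dom_problem_047 k N → D_problem_047 k N →
    problem_047 k N ≠ problem_047_alt k N

-- ===== LEMMAS AND PROOFS =====
def sCount (j n : Nat) : Nat :=
  ((Finset.range j).filter (fun p => p.Prime ∧ p ∣ n ∧ 2 * p ≤ n)).card
def Fpart (j n : Nat) : Int := if n < 2 then 0 else 1 + sCount j n
def Ffin (n : Nat) : Int := Fpart n n

lemma Ffin_eq_one_iff (n : Nat) : Ffin n = 1 ↔ n.Prime := by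
  unfold Ffin Fpart
  by_cases h2 : n < 2
  · simp only [if_pos h2]
    constructor
    · intro h; omega
    · intro hp; have := hp.two_le; omega
  · simp only [if_neg h2]
    have hcast : (1 : Int) + (sCount n n : Int) = 1 ↔ sCount n n = 0 := by omega
    rw [hcast]
    unfold sCount
    rw [Finset.card_eq_zero]
    constructor
    · intro hempty
      by_contra hnp
      have hne1 : n ≠ 1 := by omega
      have hq := Nat.minFac_prime hne1
      have hqd := Nat.minFac_dvd n
      have hsq : n.minFac ^ 2 ≤ n := Nat.minFac_sq_le_self (by omega) hnp
      have h2q : 2 * n.minFac ≤ n := by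
        have := hq.two_le; nlinarith [sq_nonneg n.minFac]
      have : n.minFac ∈ (Finset.range n).filter (fun p => p.Prime ∧ p ∣ n ∧ 2 * p ≤ n) := by
        simp only [Finset.mem_filter, Finset.mem_range]
        exact ⟨by have := hq.two_le; omega, hq, hqd, h2q⟩
      rw [hempty] at this
      exact absurd this (Finset.notMem_empty _)
    · intro hp
      apply Finset.filter_eq_empty_iff.mpr
      intro p _
      rintro ⟨hpp, hpd, h2p⟩
      rcases hp.eq_one_or_self_of_dvd p hpd with h | h
      · subst h; have := hpp.two_le; omega
      · omega

lemma Fpart_succ_prime (j n : Nat) (hj : j.Prime) :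
    Fpart (j + 1) n = Fpart j n + (if j ∣ n ∧ 2 * j ≤ n then 1 else 0) := by
  unfold Fpart
  by_cases h2 : n < 2
  · have hcond : ¬ (j ∣ n ∧ 2 * j ≤ n) := by
      rintro ⟨_, hle⟩; have := hj.two_le; omega
    simp [h2, hcond]
  · simp only [if_neg h2]
    unfold sCount
    rw [Finset.range_add_one, Finset.filter_insert]
    by_cases hP : j.Prime ∧ j ∣ n ∧ 2 * j ≤ n
    · rw [if_pos hP, Finset.card_insert_of_notMem (by simp [Finset.mem_filter])]
      have : j ∣ n ∧ 2 * j ≤ n := hP.2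
      rw [if_pos this]
      push_cast; ring
    · have hcond : ¬ (j ∣ n ∧ 2 * j ≤ n) := fun h => hP ⟨hj, h⟩
      rw [if_neg hP, if_neg hcond]
      ring

lemma Fpart_succ_not_prime (j n : Nat) (hj : ¬ j.Prime) : Fpart (j + 1) n = Fpart j n := by
  unfold Fpart
  by_cases h2 : n < 2
  · simp [h2]
  · simp only [if_neg h2]
    unfold sCount
    rw [Finset.range_add_one, Finset.filter_insert, if_neg (by rintro ⟨h, _⟩; exact hj h)]

lemma sCount_eq_card (n : Nat) (h2 : 2 ≤ n) (hnp : ¬ n.Prime) :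
    sCount n n = n.primeFactors.card := by
  unfold sCount
  congr 1
  apply Finset.ext
  intro p
  simp only [Finset.mem_filter, Finset.mem_range, Nat.mem_primeFactors]
  constructor
  · rintro ⟨_, hp, hd, _⟩
    exact ⟨hp, hd, by omega⟩
  · rintro ⟨hp, hd, _⟩
    obtain ⟨c, hc⟩ := hd
    have hc0 : c ≠ 0 := by rintro rfl; omega
    have hc1 : c ≠ 1 := by rintro rfl; rw [hc] at hnp; simp at hnp; exact hnp hp
    have h2p : 2 * p ≤ n := by
      calc 2 * p = p * 2 := by ring
      _ ≤ p * c := Nat.mul_le_mul_left p (by omega)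
      _ = n := hc.symm
    have := hp.two_le
    exact ⟨by omega, hp, ⟨c, hc⟩, h2p⟩

lemma pvDivOutF_dvd (fuel m p : Nat) : pvDivOutF fuel m p ∣ m := by
  induction fuel generalizing m with
  | zero => simp [pvDivOutF]
  | succ f ih =>
    rw [pvDivOutF]
    split
    · exact dvd_trans (ih (m / p)) (Nat.div_dvd_of_dvd ‹_›)
    · exact dvd_rfl

lemma pvDivOutF_pos (fuel m p : Nat) (h : 0 < m) : 0 < pvDivOutF fuel m p :=
  Nat.pos_of_dvd_of_pos (pvDivOutF_dvd fuel m p) h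

lemma pvDivOutF_le (fuel m p : Nat) (hm : 0 < m) : pvDivOutF fuel m p ≤ m :=
  Nat.le_of_dvd hm (pvDivOutF_dvd fuel m p)

lemma pvDivOutF_not_dvd (fuel m p : Nat) (hf : m ≤ fuel) (hp : 2 ≤ p) (hm : 0 < m) :
    ¬ p ∣ pvDivOutF fuel m p := by
  induction fuel generalizing m with
  | zero => omega
  | succ f ih =>
    rw [pvDivOutF]
    split
    · rename_i hdvd
      have hple : p ≤ m := Nat.le_of_dvd hm hdvd
      have hlt : m / p < m := Nat.div_lt_self hm (by omega)
      have hpos : 0 < m / p := Nat.div_pos hple (by omega)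
      exact ih (m / p) (by omega) hpos
    · exact ‹¬ p ∣ m›

lemma pvDivOutF_dvd_iff (fuel m p q : Nat) (hp : p.Prime) (hq : q.Prime) (hne : q ≠ p) :
    q ∣ pvDivOutF fuel m p ↔ q ∣ m := by
  induction fuel generalizing m with
  | zero => simp [pvDivOutF]
  | succ f ih =>
    rw [pvDivOutF]
    split
    · rename_i hdvd
      rw [ih (m / p)]
      constructor
      · intro h; exact dvd_trans h (Nat.div_dvd_of_dvd hdvd)
      · intro h
        have hmul : m = p * (m / p) := (Nat.mul_div_cancel' hdvd).symm
        rw [hmul] at h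
        rcases hq.dvd_mul.mp h with h' | h'
        · exact absurd ((Nat.prime_dvd_prime_iff_eq hq hp).mp h') hne
        · exact h'
    · rfl

lemma primeFactors_pvDivOutF (fuel m p : Nat) (hf : m ≤ fuel) (hp : p.Prime) (hm : 0 < m) :
    (pvDivOutF fuel m p).primeFactors = m.primeFactors.erase p := by
  apply Finset.ext
  intro q
  simp only [Nat.mem_primeFactors, Finset.mem_erase]
  constructor
  · rintro ⟨hq, hd, _⟩
    have hne : q ≠ p := fun h => pvDivOutF_not_dvd fuel m p hf hp.two_le hm (h ▸ hd)
    exact ⟨hne, hq, (pvDivOutF_dvd_iff fuel m p q hp hq hne).mp hd, by omega⟩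
  · rintro ⟨hne, hq, hd, _⟩
    exact ⟨hq, (pvDivOutF_dvd_iff fuel m p q hp hq hne).mpr hd,
      (pvDivOutF_pos fuel m p hm).ne' ⟩

lemma size_foldl_modify (is : List Int) (f : Array Int) :
    (is.foldl (fun g i => g.modify i.toNat (· + 1)) f).size = f.size := by
  induction is generalizing f with
  | nil => rfl
  | cons i is ih => simp [List.foldl_cons, ih, Array.size_modify]

lemma size_pvSieveStep (f : Array Int) (p : Nat) : (pvSieveStep f p).size = f.size :=
  size_foldl_modify _ f

lemma getD_foldl_modify (is : List Int) (f : Array Int) (n : Nat)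
    (hpos : ∀ i ∈ is, 0 ≤ i) (hnd : is.Nodup) :
    (is.foldl (fun g i => g.modify i.toNat (· + 1)) f).getD n 0 =
      f.getD n 0 + (if (n : Int) ∈ is ∧ n < f.size then 1 else 0) := by
  induction is generalizing f with
  | nil => simp
  | cons i is ih =>
    rw [List.foldl_cons]
    rw [ih _ (fun x hx => hpos x (List.mem_cons_of_mem i hx)) (List.Nodup.of_cons hnd)]
    rw [Array.size_modify]
    have h0 : 0 ≤ i := hpos i List.mem_cons_self
    by_cases hin : i = (n : Int)
    · have hnotmem : (n : Int) ∉ is := hin ▸ (List.nodup_cons.mp hnd).1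
      have htn : i.toNat = n := by omega
      rw [htn]
      by_cases hlt : n < f.size
      · simp [Array.getD_eq_getD_getElem?, Array.getElem_modify, hnotmem, hlt, hin]
      · have hnone : f[n]? = none := by simp; omega
        simp [Array.getD_eq_getD_getElem?, hnotmem, hlt]
    · have htn : i.toNat ≠ n := by omega
      have hmem : ((n : Int) ∈ i :: is) ↔ ((n : Int) ∈ is) := by
        rw [List.mem_cons]
        constructor
        · rintro (h | h)
          · exact absurd h.symm hin
          · exact h
        · exact Or.inr
      have hgd : (f.modify i.toNat (· + 1)).getD n 0 = f.getD n 0 := by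
        simp [Array.getD_eq_getD_getElem?, Array.getElem?_modify, htn]
      rw [hgd, if_congr (and_congr_left' hmem) rfl rfl]

lemma pvSieveStep_getD (f : Array Int) (p : Nat) (hp : 1 ≤ p) (n : Nat) :
    (pvSieveStep f p).getD n 0 =
      f.getD n 0 + (if p ∣ n ∧ 2 * p ≤ n ∧ n < f.size then 1 else 0) := by
  have hps : (0 : Int) < (p : Int) := by exact_mod_cast hp
  unfold pvSieveStep
  rw [getD_foldl_modify]
  · congr 1
    apply if_congr _ rfl rfl
    rw [PySem.List.mem_pyRange_iff_of_pos hps]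
    constructor
    · rintro ⟨⟨h1, h2, h3⟩, h4⟩
      have hdvd : (p : Int) ∣ (n : Int) := by
        have : (n : Int) = ((n : Int) - 2 * p) + 2 * p := by ring
        rw [this]
        exact dvd_add h3 ⟨2, by ring⟩
      exact ⟨by exact_mod_cast hdvd, by exact_mod_cast h1, h4⟩
    · rintro ⟨h1, h2, h3⟩
      refine ⟨⟨by exact_mod_cast h2, by exact_mod_cast h3, ?_⟩, h3⟩
      have hdvd : (p : Int) ∣ (n : Int) := by exact_mod_cast h1
      exact dvd_sub hdvd ⟨2, by ring⟩
  · intro i hi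
    rw [PySem.List.mem_pyRange_iff_of_pos hps] at hi
    have := hi.1
    have h2p : (0 : Int) ≤ 2 * (p : Int) := by positivity
    omega
  · rw [PySem.List.pyRange_of_pos _ _ hps]
    apply List.Nodup.map
    · intro a b hab
      simp only at hab
      have : (p : Int) * a = (p : Int) * b := by omega
      exact_mod_cast mul_left_cancel₀ (by omega) this
    · exact List.nodup_range

-- qualifying test A applies at index n, the k-run test, and B's counterparts, over Nat indices
def qb (k : Int) (n : Nat) : Bool := decide (Ffin n ≠ 1 ∧ Ffin n = k + 1)
def goodA (k : Int) (n : Nat) : Bool := qb k n && (List.range k.toNat).all (fun i => qb k (n - i))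
def qbB (k : Int) (n : Nat) : Bool := decide ((n.primeFactors.card : Int) = k)
def goodB (k : Int) (n : Nat) : Bool := (List.range k.toNat).all (fun i => qbB k (n - i))

lemma Ffin_low {n : Nat} (h : n < 2) : Ffin n = 0 := by
  unfold Ffin Fpart; rw [if_pos h]

lemma Ffin_high {n : Nat} (h : 2 ≤ n) : Ffin n = 1 + (sCount n n : Int) := by
  unfold Ffin Fpart; rw [if_neg (by omega)]

lemma qb_low (k : Int) (hk : k ≠ -1) {n : Nat} (h : n < 2) : qb k n = false := by
  simp only [qb, Ffin_low h, decide_eq_false_iff_not]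
  rintro ⟨-, h2⟩; omega

lemma qb_false_of_nonpos (k : Int) (hk : k ≤ 0) (hk' : k ≠ -1) (n : Nat) : qb k n = false := by
  by_cases h2 : n < 2
  · exact qb_low k hk' h2
  · simp only [qb, Ffin_high (by omega : 2 ≤ n), decide_eq_false_iff_not]
    rintro ⟨h1, hkk⟩
    have : (0 : Int) ≤ (sCount n n : Int) := by positivity
    omega

lemma qbB_low (k : Int) (hk : 1 ≤ k) {n : Nat} (h : n < 2) : qbB k n = false := by
  have h0 : n.primeFactors.card = 0 := by
    interval_cases n
    · simp
    · simp [Nat.primeFactors_one]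
  simp only [qbB, h0, Nat.cast_zero, decide_eq_false_iff_not]
  omega

lemma qb_eq_qbB (k : Int) (hk : 2 ≤ k) (n : Nat) : qb k n = qbB k n := by
  by_cases h2 : n < 2
  · rw [qb_low k (by omega) h2, qbB_low k (by omega) h2]
  · by_cases hp : n.Prime
    · have h1 : Ffin n = 1 := (Ffin_eq_one_iff n).mpr hp
      have hcard : n.primeFactors.card = 1 := by rw [hp.primeFactors]; simp
      simp only [qb, qbB, h1, hcard]
      simp only [ne_eq, not_true_eq_false, false_and, decide_false]
      symm
      simp only [decide_eq_false_iff_not]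
      omega
    · have hF : Ffin n = 1 + (n.primeFactors.card : Int) := by
        rw [Ffin_high (by omega : 2 ≤ n), sCount_eq_card n (by omega) hp]
      simp only [qb, qbB, hF, decide_eq_decide]
      omega

-- characterization of A's main loop
lemma loopA_char (k : Int) (hk : k ≠ -1) (L : Nat) :
    ∀ (m j : Nat) (f : Array Int) (ks : PySem.Set Int), j + m = L → f.size = L →
    (∀ n : Nat, n < L → f.getD n 0 = Fpart j n) →
    (∀ v : Int, ks.contains v = true ↔ ∃ q : Nat, q < j ∧ qb k q = true ∧ v = (q : Int)) →
    pvLoopA k (List.range' j m) f ks =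
      (match (List.range' j m).find? (goodA k) with
       | some n => (n : Int) - k + 1
       | none => 0) := by
  intro m
  induction m with
  | zero => intro j f ks _ _ _ _; simp [pvLoopA, List.range']
  | succ m ih =>
    intro j f ks hjm hlen hgetD hks
    rw [List.range'_succ]
    have hjL : j < L := by omega
    have hread : f.getD j 0 = Ffin j := hgetD j hjL
    simp only [pvLoopA, hread]
    by_cases hb1 : Ffin j = 1
    · rw [if_pos hb1]
      have hprime := (Ffin_eq_one_iff j).mp hb1
      have hq : qb k j = false := by
        simp only [qb, decide_eq_false_iff_not]
        rintro ⟨h, -⟩; exact h hb1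
      have hfind : List.find? (goodA k) (j :: List.range' (j + 1) m) =
          List.find? (goodA k) (List.range' (j + 1) m) := by
        exact List.find?_cons_of_neg (by simp [goodA, hq])
      rw [hfind]
      apply ih (j + 1) (pvSieveStep f j) ks (by omega)
        (by rw [size_pvSieveStep, hlen])
      · intro n hn
        rw [pvSieveStep_getD f j (by have := hprime.two_le; omega) n]
        rw [hgetD n hn, Fpart_succ_prime j n hprime, hlen]
        congr 1
        apply if_congr _ rfl rfl
        constructor
        · rintro ⟨a, b, -⟩; exact ⟨a, b⟩
        · rintro ⟨a, b⟩; exact ⟨a, b, hn⟩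
      · intro v
        rw [hks v]
        constructor
        · rintro ⟨q, h1, h2, h3⟩; exact ⟨q, by omega, h2, h3⟩
        · rintro ⟨q, h1, h2, h3⟩
          refine ⟨q, ?_, h2, h3⟩
          rcases Nat.lt_or_ge q j with h | h
          · exact h
          · exfalso
            have : q = j := by omega
            rw [this] at h2
            rw [hq] at h2
            exact Bool.false_ne_true h2
    · by_cases hb2 : Ffin j = k + 1
      · rw [if_neg hb1, if_pos hb2]
        have hq : qb k j = true := by simp only [qb, decide_eq_true_eq]; exact ⟨hb1, hb2⟩
        have hnp : ¬ j.Prime := fun hp => hb1 ((Ffin_eq_one_iff j).mpr hp)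
        have hks' : ∀ v : Int, (ks.add (j : Int)).contains v = true ↔
            ∃ q : Nat, q < j + 1 ∧ qb k q = true ∧ v = (q : Int) := by
          intro v
          rw [PySem.Set.contains_iff, PySem.Set.mem_add]
          rw [show (v ∈ ks) ↔ (ks.contains v = true) from (PySem.Set.contains_iff ks v).symm, hks v]
          constructor
          · rintro (⟨q, h1, h2, h3⟩ | rfl)
            · exact ⟨q, by omega, h2, h3⟩
            · exact ⟨j, by omega, hq, rfl⟩
          · rintro ⟨q, h1, h2, h3⟩
            rcases Nat.lt_or_ge q j with h | h
            · exact Or.inl ⟨q, h, h2, h3⟩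
            · have : q = j := by omega
              subst this
              exact Or.inr h3
        have hall : ((PySem.List.pyRange 1 k 1).all
              (fun i => (ks.add (j : Int)).contains ((j : Int) - i))) =
            ((List.range k.toNat).all (fun i => qb k (j - i))) := by
          rw [Bool.eq_iff_iff, List.all_eq_true, List.all_eq_true]
          constructor
          · intro h i hi
            rw [List.mem_range] at hi
            by_cases hi0 : i = 0
            · subst hi0; simpa using hq
            · have hmem : ((i : Int)) ∈ PySem.List.pyRange 1 k 1 := by
                rw [PySem.List.mem_pyRange_one]; omega
              have hc := h (i : Int) hmem
              rw [hks'] at hc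
              obtain ⟨q, h1, h2, h3⟩ := hc
              have : j - i = q := by omega
              rw [this]; exact h2
          · intro h i hi
            rw [PySem.List.mem_pyRange_one] at hi
            have hit : i = ((i.toNat : Nat) : Int) := by omega
            have hitk : i.toNat < k.toNat := by omega
            have hqb := h i.toNat (by rw [List.mem_range]; exact hitk)
            rcases Nat.lt_or_ge j i.toNat with hij | hij
            · exfalso
              rw [show j - i.toNat = 0 from by omega, qb_low k hk (by omega)] at hqb
              exact Bool.false_ne_true hqb
            · rw [hks']
              exact ⟨j - i.toNat, by omega, hqb, by omega⟩
        rw [hall]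
        by_cases hr : ((List.range k.toNat).all (fun i => qb k (j - i))) = true
        · rw [if_pos hr]
          have hgood : goodA k j = true := by simp [goodA, hq, hr]
          rw [List.find?_cons_of_pos hgood]
        · rw [if_neg hr]
          have hgood : goodA k j = false := by
            simp only [goodA, Bool.and_eq_false_iff]
            right
            exact Bool.not_eq_true _ ▸ hr
          rw [List.find?_cons_of_neg (by simp [hgood])]
          apply ih (j + 1) f (ks.add (j : Int)) (by omega) hlen
          · intro n hn
            rw [hgetD n hn, Fpart_succ_not_prime j n hnp]
          · exact hks'
      · rw [if_neg hb1, if_neg hb2]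
        have hq : qb k j = false := by
          simp only [qb, decide_eq_false_iff_not]
          rintro ⟨-, h⟩; exact hb2 h
        have hnp : ¬ j.Prime := fun hp => hb1 ((Ffin_eq_one_iff j).mpr hp)
        rw [List.find?_cons_of_neg (by simp [goodA, hq])]
        apply ih (j + 1) f ks (by omega) hlen
        · intro n hn
          rw [hgetD n hn, Fpart_succ_not_prime j n hnp]
        · intro v
          rw [hks v]
          constructor
          · rintro ⟨q, h1, h2, h3⟩; exact ⟨q, by omega, h2, h3⟩
          · rintro ⟨q, h1, h2, h3⟩
            refine ⟨q, ?_, h2, h3⟩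
            rcases Nat.lt_or_ge q j with h | h
            · exact h
            · exfalso
              have : q = j := by omega
              rw [this, hq] at h2
              exact Bool.false_ne_true h2

lemma factorsInit_length (N : Int) : (pvFactorsInit N).size = 2 + (N - 1).toNat := by
  simp [pvFactorsInit]
  omega

lemma factorsInit_getD (N : Int) (n : Nat) (hn : n < 2 + (N - 1).toNat) :
    (pvFactorsInit N).getD n 0 = Fpart 0 n := by
  unfold pvFactorsInit Fpart sCount
  rw [Array.getD_eq_getD_getElem?, List.getElem?_toArray]
  match n with
  | 0 => simp
  | 1 => simp
  | (m + 2) =>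
    rw [if_neg (by omega)]
    simp only [Finset.range_zero, Finset.filter_empty, Finset.card_empty, Nat.cast_zero, add_zero]
    show (((0 : Int) :: (0 : Int) :: List.replicate (N - 1).toNat 1)[m + 2]?).getD 0 = 1
    simp only [List.getElem?_cons_succ]
    rw [List.getElem?_replicate]
    rw [if_pos (by omega)]
    rfl

lemma A_char (k : Int) (hk : k ≠ -1) (N : Int) :
    problem_047 k N =
      (match (List.range' 2 (N - 1).toNat).find? (goodA k) with
       | some n => (n : Int) - k + 1
       | none => 0) := by
  show pvLoopA k (List.range (pvFactorsInit N).size) (pvFactorsInit N) PySem.Set.empty = _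
  have hlen := factorsInit_length N
  set t := (N - 1).toNat with ht
  rw [List.range_eq_range']
  rw [loopA_char k hk (2 + t) (pvFactorsInit N).size 0 (pvFactorsInit N) PySem.Set.empty
      (by omega) hlen (fun n hn => factorsInit_getD N n (by omega))
      (by intro v; simp [PySem.Set.empty])]
  rw [hlen]
  rw [show 2 + t = (1 + t) + 1 from by omega, List.range'_succ]
  rw [show 1 + t = t + 1 from by omega, List.range'_succ]
  rw [List.find?_cons_of_neg (by simp [goodA, qb_low k hk (by omega : (0:Nat) < 2)])]
  rw [List.find?_cons_of_neg (by simp [goodA, qb_low k hk (by omega : (1:Nat) < 2)])]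

-- smallest-prime-factor table correctness
def SpfVal (j m : Nat) : Int := if 2 ≤ m ∧ ¬ m.Prime ∧ m.minFac < j then (m.minFac : Int) else 0
def SpfFin (m : Nat) : Int := if 2 ≤ m ∧ ¬ m.Prime then (m.minFac : Int) else 0

lemma minFac_lt_of_composite (m : Nat) (h2 : 2 ≤ m) (hnp : ¬ m.Prime) : m.minFac < m := by
  have hsq : m.minFac ^ 2 ≤ m := Nat.minFac_sq_le_self (by omega) hnp
  have h2q := (Nat.minFac_prime (show m ≠ 1 by omega)).two_le
  nlinarith

lemma minFac_two_le (m : Nat) (h2 : 2 ≤ m) : 2 ≤ m.minFac :=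
  (Nat.minFac_prime (show m ≠ 1 by omega)).two_le

lemma SpfVal_succ_of_ne (p n : Nat) (h : ¬ (2 ≤ n ∧ ¬ n.Prime ∧ n.minFac = p)) :
    SpfVal (p + 1) n = SpfVal p n := by
  unfold SpfVal
  by_cases hS : 2 ≤ n ∧ ¬ n.Prime ∧ n.minFac < p
  · rw [if_pos ⟨hS.1, hS.2.1, by omega⟩, if_pos hS]
  · rw [if_neg hS, if_neg ?_]
    rintro ⟨h2n, hnp, hlt⟩
    rcases Nat.lt_or_ge n.minFac p with hc | hc
    · exact hS ⟨h2n, hnp, hc⟩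
    · exact h ⟨h2n, hnp, by omega⟩

lemma size_foldl_setIfZero (is : List Int) (v : Int) (g0 : Array Int) :
    (is.foldl (fun g i => if g.getD i.toNat 0 = 0 then g.setIfInBounds i.toNat v else g) g0).size
      = g0.size := by
  induction is generalizing g0 with
  | nil => rfl
  | cons i is ih =>
    rw [List.foldl_cons, ih]
    split <;> simp [Array.size_setIfInBounds]

lemma getD_foldl_setIfZero (is : List Int) (v : Int) (g0 : Array Int) (m : Nat)
    (hpos : ∀ i ∈ is, 0 ≤ i) (hnd : is.Nodup) :
    (is.foldl (fun g i => if g.getD i.toNat 0 = 0 then g.setIfInBounds i.toNat v else g) g0).getD m 0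
      = if (m : Int) ∈ is ∧ m < g0.size ∧ g0.getD m 0 = 0 then v else g0.getD m 0 := by
  induction is generalizing g0 with
  | nil => simp
  | cons i is ih =>
    rw [List.foldl_cons]
    have h0 : 0 ≤ i := hpos i List.mem_cons_self
    set g1 := if g0.getD i.toNat 0 = 0 then g0.setIfInBounds i.toNat v else g0 with hg1
    have hsz : g1.size = g0.size := by rw [hg1]; split <;> simp [Array.size_setIfInBounds]
    rw [ih g1 (fun x hx => hpos x (List.mem_cons_of_mem i hx)) (List.Nodup.of_cons hnd), hsz]
    by_cases hin : i = (m : Int)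
    · subst hin
      have hnotmem : (m : Int) ∉ is := (List.nodup_cons.mp hnd).1
      rw [hg1, Int.toNat_natCast]
      by_cases hz : g0.getD m 0 = 0
      · rw [if_pos hz]
        by_cases hlt : m < g0.size
        · have : (g0.setIfInBounds m v).getD m 0 = v := by
            simp [Array.getD_eq_getD_getElem?, hlt]
          rw [this]
          rw [if_neg (by rintro ⟨h1, -⟩; exact hnotmem h1)]
          rw [if_pos ⟨List.mem_cons_self, hlt, hz⟩]
        · have hsame : (g0.setIfInBounds m v).getD m 0 = g0.getD m 0 := by
            simp [Array.getD_eq_getD_getElem?, hlt]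
          rw [hsame]
          rw [if_neg (by rintro ⟨h1, -⟩; exact hnotmem h1)]
          rw [if_neg (by rintro ⟨-, h2, -⟩; exact hlt h2)]
      · rw [if_neg hz]
        rw [if_neg (by rintro ⟨h1, -⟩; exact hnotmem h1)]
        rw [if_neg (by rintro ⟨-, -, h3⟩; exact hz h3)]
    · have htn : i.toNat ≠ m := by omega
      have hval : g1.getD m 0 = g0.getD m 0 := by
        rw [hg1]
        split
        · simp [Array.getD_eq_getD_getElem?, htn]
        · rfl
      rw [hval]
      have hmem : ((m : Int) ∈ i :: is) ↔ ((m : Int) ∈ is) := by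
        rw [List.mem_cons]
        constructor
        · rintro (h | h)
          · exact absurd h.symm hin
          · exact h
        · exact Or.inr
      rw [if_congr (and_congr_left' hmem) rfl rfl]

lemma pvSpfMark_getD (spf : Array Int) (p NN : Nat) (hp : 1 ≤ p) (m : Nat) :
    (pvSpfMark spf p NN).getD m 0 =
      if p ∣ m ∧ p * p ≤ m ∧ m ≤ NN ∧ m < spf.size ∧ spf.getD m 0 = 0 then (p : Int)
      else spf.getD m 0 := by
  have hps : (0 : Int) < (p : Int) := by exact_mod_cast hp
  unfold pvSpfMark
  rw [getD_foldl_setIfZero]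
  · apply if_congr _ rfl rfl
    rw [PySem.List.mem_pyRange_iff_of_pos hps]
    constructor
    · rintro ⟨⟨h1, h2, h3⟩, h4, h5⟩
      have hdvd : (p : Int) ∣ (m : Int) := by
        have : (m : Int) = ((m : Int) - (p * p : Nat)) + (p * p : Nat) := by ring
        rw [this]
        exact dvd_add h3 (by push_cast; exact Dvd.intro p rfl)
      exact ⟨by exact_mod_cast hdvd, by exact_mod_cast h1, by omega, h4, h5⟩
    · rintro ⟨h1, h2, h3, h4, h5⟩
      refine ⟨⟨by exact_mod_cast h2, by push_cast; omega, ?_⟩, h4, h5⟩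
      have hdvd : (p : Int) ∣ (m : Int) := by exact_mod_cast h1
      exact dvd_sub hdvd (by push_cast; exact Dvd.intro p rfl)
  · intro i hi
    rw [PySem.List.mem_pyRange_iff_of_pos hps] at hi
    have := hi.1
    have h2p : (0 : Int) ≤ ((p * p : Nat) : Int) := by positivity
    omega
  · rw [PySem.List.pyRange_of_pos _ _ hps]
    apply List.Nodup.map
    · intro a b hab
      simp only at hab
      have : (p : Int) * a = (p : Int) * b := by omega
      exact_mod_cast mul_left_cancel₀ (by omega) this
    · exact List.nodup_range

lemma size_pvSpfMark (spf : Array Int) (p NN : Nat) : (pvSpfMark spf p NN).size = spf.size :=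
  size_foldl_setIfZero _ _ spf

lemma spfOuter_spec (fuel : Nat) : ∀ (spf : Array Int) (p NN : Nat),
    NN + 2 ≤ fuel + p → 2 ≤ p → spf.size = NN + 1 →
    (∀ m, m ≤ NN → spf.getD m 0 = SpfVal p m) →
    ∀ m, m ≤ NN → (pvSpfOuter fuel spf p NN).getD m 0 = SpfFin m := by
  induction fuel with
  | zero =>
    intro spf p NN hf hp hsz hinv m hm
    rw [pvSpfOuter, hinv m hm]
    unfold SpfVal SpfFin
    by_cases hc : 2 ≤ m ∧ ¬ m.Prime
    · have hle : m.minFac ≤ m := Nat.minFac_le (by omega)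
      rw [if_pos ⟨hc.1, hc.2, by omega⟩, if_pos hc]
    · rw [if_neg (by rintro ⟨h1, h2, -⟩; exact hc ⟨h1, h2⟩), if_neg hc]
  | succ fuel ih =>
    intro spf p NN hf hp hsz hinv m hm
    rw [pvSpfOuter]
    by_cases hpp : p * p ≤ NN
    · rw [if_pos hpp]
      have hpNN : p ≤ NN := le_trans (by nlinarith) hpp
      have hread : spf.getD p 0 = SpfVal p p := hinv p hpNN
      by_cases hpr : p.Prime
      · have hz : spf.getD p 0 = 0 := by
          rw [hread]
          unfold SpfVal
          rw [if_neg (by rintro ⟨-, h2, -⟩; exact h2 hpr)]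
        rw [if_pos hz]
        apply ih (pvSpfMark spf p NN) (p + 1) NN (by omega) (by omega)
          (by rw [size_pvSpfMark, hsz]) _ m hm
        intro n hn
        rw [pvSpfMark_getD spf p NN (by omega) n, hinv n hn]
        by_cases hset : p ∣ n ∧ p * p ≤ n ∧ n ≤ NN ∧ n < spf.size ∧ SpfVal p n = 0
        · rw [if_pos hset]
          obtain ⟨hdvd, hsq, -, -, hz0⟩ := hset
          have h2n : 2 ≤ n := by nlinarith
          have hnp : ¬ n.Prime := by
            intro hprime
            have := (hprime.eq_one_or_self_of_dvd p hdvd).resolve_left (by omega)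
            nlinarith
          have hmfeq : n.minFac = p := by
            have hmfle : n.minFac ≤ p := Nat.minFac_le_of_dvd (by omega) hdvd
            rcases Nat.lt_or_ge n.minFac p with hlt | hge
            · exfalso
              unfold SpfVal at hz0
              rw [if_pos ⟨h2n, hnp, hlt⟩] at hz0
              have := minFac_two_le n h2n
              omega
            · omega
          unfold SpfVal
          rw [if_pos ⟨h2n, hnp, by omega⟩, hmfeq]
        · rw [if_neg hset]
          symm
          apply SpfVal_succ_of_ne
          rintro ⟨h2n, hnp, hmfp⟩
          apply hset
          have hdvd : p ∣ n := hmfp ▸ Nat.minFac_dvd n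
          have hsq' : n.minFac ^ 2 ≤ n := Nat.minFac_sq_le_self (show 0 < n by omega) hnp
          have hsq : p * p ≤ n := by rw [hmfp] at hsq'; nlinarith [hsq']
          refine ⟨hdvd, hsq, hn, by omega, ?_⟩
          unfold SpfVal
          rw [if_neg (by rintro ⟨-, -, hl⟩; omega)]
      · have hz : ¬ spf.getD p 0 = 0 := by
          rw [hread]
          unfold SpfVal
          have h2f := minFac_two_le p hp
          rw [if_pos ⟨hp, hpr, minFac_lt_of_composite p hp hpr⟩]
          intro hc
          omega
        rw [if_neg hz]
        apply ih spf (p + 1) NN (by omega) (by omega) hsz _ m hm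
        intro n hn
        rw [hinv n hn]
        symm
        apply SpfVal_succ_of_ne
        rintro ⟨h2n, hnp, hmfp⟩
        exact hpr (hmfp ▸ Nat.minFac_prime (show n ≠ 1 by omega))
    · rw [if_neg hpp, hinv m hm]
      unfold SpfVal SpfFin
      by_cases hc : 2 ≤ m ∧ ¬ m.Prime
      · have hsq : m.minFac ^ 2 ≤ m := Nat.minFac_sq_le_self (by omega) hc.2
        have hlt : m.minFac < p := by nlinarith
        rw [if_pos ⟨hc.1, hc.2, hlt⟩, if_pos hc]
      · rw [if_neg (by rintro ⟨h1, h2, -⟩; exact hc ⟨h1, h2⟩), if_neg hc]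

lemma walk_spec (spf : Array Int)
    (hspf : ∀ n, 2 ≤ n → n < spf.size → spf.getD n 0 = SpfFin n) :
    ∀ (fuel m c : Nat), 1 ≤ m → m < spf.size → m ≤ fuel →
    pvWalk fuel spf m c = c + m.primeFactors.card := by
  intro fuel
  induction fuel with
  | zero => intro m c h1 _ hf; omega
  | succ fuel ih =>
    intro m c h1 hsz hf
    rw [pvWalk]
    by_cases h2 : 1 < m
    · rw [if_pos h2]
      have hread : spf.getD m 0 = SpfFin m := hspf m (by omega) hsz
      by_cases hpr : m.Prime
      · have : spf.getD m 0 = 0 := by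
          rw [hread]; unfold SpfFin; rw [if_neg (by rintro ⟨-, h⟩; exact h hpr)]
        simp only [this, if_true]
        rw [hpr.primeFactors]
        simp
      · have hmf2 := minFac_two_le m (by omega)
        have hval : spf.getD m 0 = (m.minFac : Int) := by
          rw [hread]; unfold SpfFin; rw [if_pos ⟨by omega, hpr⟩]
        have hne : ¬ spf.getD m 0 = 0 := by rw [hval]; intro h; omega
        simp only [hval, if_neg (show ¬ (m.minFac : Int) = 0 by omega)]
        have htn : ((m.minFac : Int)).toNat = m.minFac := by omega
        rw [htn]
        set d := pvDivOutF m m m.minFac with hd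
        have hq := Nat.minFac_prime (show m ≠ 1 by omega)
        have hdvd := Nat.minFac_dvd m
        have hdpos : 0 < d := pvDivOutF_pos m m m.minFac (by omega)
        have hdlt : d < m := by
          have hnd : ¬ m.minFac ∣ d := pvDivOutF_not_dvd m m m.minFac le_rfl hmf2 (by omega)
          have hdle : d ≤ m := pvDivOutF_le m m m.minFac (by omega)
          have hne2 : d ≠ m := fun he => hnd (he ▸ hdvd)
          omega
        rw [ih d (c + 1) (by omega) (by omega) (by omega)]
        have hpf : d.primeFactors = m.primeFactors.erase m.minFac :=
          primeFactors_pvDivOutF m m m.minFac le_rfl hq (by omega)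
        have hpmem : m.minFac ∈ m.primeFactors :=
          Nat.mem_primeFactors.mpr ⟨hq, hdvd, by omega⟩
        rw [hpf, Finset.card_erase_of_mem hpmem]
        have : 1 ≤ m.primeFactors.card := Finset.card_pos.mpr ⟨m.minFac, hpmem⟩
        omega
    · rw [if_neg h2]
      have : m = 1 := by omega
      subst this
      simp [Nat.primeFactors_one]

-- the spf table B builds for a given N computes the distinct-prime-factor counts
lemma spf_final (N : Int) (_hN : ¬ N < 2) : ∀ n, 2 ≤ n → n ≤ N.toNat →
    (pvOmegaSpf (pvSpfOuter (N.toNat + 2) (Array.replicate (N.toNat + 1) 0) 2 N.toNat) n : Int)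
      = (n.primeFactors.card : Int) := by
  intro n h2 hn
  set spf := pvSpfOuter (N.toNat + 2) (Array.replicate (N.toNat + 1) 0) 2 N.toNat with hspf
  have hsz0 : (Array.replicate (N.toNat + 1) (0 : Int)).size = N.toNat + 1 := by simp
  have hsz : spf.size = N.toNat + 1 := by
    rw [hspf]
    have : ∀ (fuel : Nat) (a : Array Int) (p NN : Nat),
        (pvSpfOuter fuel a p NN).size = a.size := by
      intro fuel
      induction fuel with
      | zero => intro a p NN; rfl
      | succ fuel ih =>
        intro a p NN
        rw [pvSpfOuter]
        split
        · split
          · rw [ih, size_pvSpfMark]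
          · rw [ih]
        · rfl
    rw [this, hsz0]
  have hvals : ∀ m, m ≤ N.toNat → spf.getD m 0 = SpfFin m := by
    apply spfOuter_spec (N.toNat + 2) (Array.replicate (N.toNat + 1) 0) 2 N.toNat
      (by omega) (by omega) hsz0
    intro m _
    have hz : (Array.replicate (N.toNat + 1) (0 : Int)).getD m 0 = 0 := by
      simp [Array.getD_eq_getD_getElem?, Array.getElem?_replicate]
      split <;> rfl
    rw [hz]
    unfold SpfVal
    rw [if_neg ?_]
    rintro ⟨h2m, -, hlt⟩
    have := minFac_two_le m h2m
    omega
  unfold pvOmegaSpf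
  rw [walk_spec spf (fun q hq hqs => hvals q (by omega)) n n 0 (by omega) (by omega) le_rfl]
  simp

-- characterization of B's main loop
lemma loopB_char (k : Int) (hk : 1 ≤ k) (spf : Array Int) (NN : Nat)
    (hspf : ∀ n, 2 ≤ n → n ≤ NN → (pvOmegaSpf spf n : Int) = (n.primeFactors.card : Int)) :
    ∀ (m j s : Nat), 2 ≤ j → j + m ≤ NN + 1 →
    (∀ i, i < s → qbB k (j - 1 - i) = true) →
    (j - 1 - s < 2 ∨ qbB k (j - 1 - s) = false) →
    ((s : Int) + 1 ≤ k) →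
    pvLoopB k spf (List.map (fun q : Nat => (q : Int)) (List.range' j m)) (s : Int) =
      (match (List.range' j m).find? (goodB k) with
       | some n => (n : Int) - k + 1
       | none => 0) := by
  intro m
  induction m with
  | zero => intro j s _ _ _ _ _; simp [pvLoopB, List.range']
  | succ m ih =>
    intro j s hj hjm H1 H1' H2
    rw [List.range'_succ, List.map_cons]
    simp only [pvLoopB, Int.toNat_natCast]
    simp only [hspf j hj (by omega)]
    by_cases hqb : qbB k j = true
    · have hc : (j.primeFactors.card : Int) = k := of_decide_eq_true hqb
      rw [if_pos hc]
      by_cases hs : (s : Int) + 1 = k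
      · rw [if_pos hs]
        have hgood : goodB k j = true := by
          rw [goodB, List.all_eq_true]
          intro i hi
          rw [List.mem_range] at hi
          by_cases hi0 : i = 0
          · subst hi0; simpa using hqb
          · have hik : i - 1 < s := by omega
            have := H1 (i - 1) hik
            rw [show j - 1 - (i - 1) = j - i from by omega] at this
            exact this
        rw [List.find?_cons_of_pos hgood]
      · rw [if_neg hs]
        have hgood : goodB k j = false := by
          apply Bool.eq_false_iff.mpr
          intro hall
          rw [goodB, List.all_eq_true] at hall
          have hw := hall (s + 1) (by rw [List.mem_range]; omega)
          rw [show j - (s + 1) = j - 1 - s from by omega] at hw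
          rcases H1' with h | h
          · rw [qbB_low k hk h] at hw; exact Bool.false_ne_true hw
          · rw [h] at hw; exact Bool.false_ne_true hw
        rw [List.find?_cons_of_neg (by simp [hgood])]
        have hcast : (s : Int) + 1 = ((s + 1 : Nat) : Int) := by push_cast; ring
        rw [hcast]
        apply ih (j + 1) (s + 1) (by omega) (by omega)
        · intro i hi
          by_cases hi0 : i = 0
          · subst hi0
            rw [show j + 1 - 1 - 0 = j from by omega]
            exact hqb
          · have := H1 (i - 1) (by omega)
            rw [show j + 1 - 1 - i = j - 1 - (i - 1) from by omega]
            exact this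
        · rcases H1' with h | h
          · left; omega
          · right
            rw [show j + 1 - 1 - (s + 1) = j - 1 - s from by omega]
            exact h
        · push_cast; omega
    · have hc : ¬ ((j.primeFactors.card : Int) = k) := fun h => hqb (decide_eq_true h)
      rw [if_neg hc]
      have hgood : goodB k j = false := by
        apply Bool.eq_false_iff.mpr
        intro hall
        rw [goodB, List.all_eq_true] at hall
        have hw := hall 0 (by rw [List.mem_range]; omega)
        rw [Nat.sub_zero] at hw
        exact hqb hw
      rw [List.find?_cons_of_neg (by simp [hgood])]
      have hcast : (0 : Int) = ((0 : Nat) : Int) := rfl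
      rw [hcast]
      apply ih (j + 1) 0 (by omega) (by omega)
      · intro i hi; omega
      · right
        rw [show j + 1 - 1 - 0 = j from by omega]
        exact Bool.not_eq_true _ ▸ hqb
      · push_cast; omega

lemma B_char (k : Int) (hk : 1 ≤ k) (N : Int) :
    problem_047_alt k N =
      (match (List.range' 2 (N - 1).toNat).find? (goodB k) with
       | some n => (n : Int) - k + 1
       | none => 0) := by
  by_cases hN : N < 2
  · unfold problem_047_alt
    rw [if_pos hN, show (N - 1).toNat = 0 from by omega]
    rfl
  · unfold problem_047_alt
    rw [if_neg hN]
    show pvLoopB k (pvSpfOuter (N.toNat + 2) (Array.replicate (N.toNat + 1) 0) 2 N.toNat)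
      (PySem.List.pyRange 2 (N + 1) 1) 0 = _
    have hrange : PySem.List.pyRange 2 (N + 1) 1 =
        List.map (fun q : Nat => (q : Int)) (List.range' 2 (N - 1).toNat) := by
      rw [PySem.List.pyRange_one, List.range'_eq_map_range, List.map_map,
          show (N + 1 - 2).toNat = (N - 1).toNat from by omega]
      apply List.map_congr_left
      intro a ha
      simp only [Function.comp_apply]
      push_cast; ring
    rw [hrange, show (0 : Int) = ((0 : Nat) : Int) from rfl]
    apply loopB_char k hk _ N.toNat (spf_final N hN) _ 2 0 (by omega) (by omega)
    · intro i hi; omega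
    · left; omega
    · omega

lemma B_zero (k : Int) (hk : k ≤ 0) (spf : Array Int) :
    ∀ (ns : List Int) (s : Nat), pvLoopB k spf ns ((s : Nat) : Int) = 0 := by
  intro ns
  induction ns with
  | nil => intro s; rfl
  | cons n rest ih =>
    intro s
    simp only [pvLoopB]
    by_cases hc : (pvOmegaSpf spf n.toNat : Int) = k
    · rw [if_pos hc, if_neg (by omega)]
      have : ((s : Int) + 1) = ((s + 1 : Nat) : Int) := by push_cast; ring
      rw [this]
      exact ih (s + 1)
    · rw [if_neg hc]
      exact ih 0

lemma B_nonpos (k : Int) (hk : k ≤ 0) (N : Int) : problem_047_alt k N = 0 := by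
  unfold problem_047_alt
  split
  · rfl
  · rw [show (0 : Int) = ((0 : Nat) : Int) from rfl, B_zero k hk]
    simp

lemma A_zero (k : Int) (hk : k ≤ 0) (hk' : k ≠ -1) (N : Int) : problem_047 k N = 0 := by
  rw [A_char k hk' N]
  have : List.find? (goodA k) (List.range' 2 (N - 1).toNat) = none := by
    rw [List.find?_eq_none]
    intro n _
    simp [goodA, qb_false_of_nonpos k hk hk' n]
  rw [this]

lemma A_neg_one (N : Int) : problem_047 (-1) N = 2 := by
  show pvLoopA (-1) (List.range (pvFactorsInit N).size) (pvFactorsInit N) PySem.Set.empty = 2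
  have hlen := factorsInit_length N
  rw [List.range_eq_range', hlen]
  rw [show 2 + (N - 1).toNat = (1 + (N - 1).toNat) + 1 from by omega, List.range'_succ]
  have hget : (pvFactorsInit N).getD 0 0 = 0 := by
    simp [pvFactorsInit]
  simp only [pvLoopA, hget]
  rw [if_neg (by omega), if_pos (by omega)]
  rw [if_pos (by simp)]
  norm_num

-- ===== VERDICT (by name: the statement is the Claim_ definition above) =====
theorem problem_047_spec : Claim_unchanged_problem_047 := by
  intro k N _ hD
  have hkne : k ≠ -1 := fun h => hD (Or.inl h)
  by_cases hk2 : 2 ≤ k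
  · rw [A_char k hkne N, B_char k (by omega) N]
    have hgood : goodA k = goodB k := by
      funext n
      have hall : ((List.range k.toNat).all (fun i => qb k (n - i))) =
          ((List.range k.toNat).all (fun i => qbB k (n - i))) := by
        rw [Bool.eq_iff_iff, List.all_eq_true, List.all_eq_true]
        constructor <;> intro h i hi
        · rw [← qb_eq_qbB k hk2]; exact h i hi
        · rw [qb_eq_qbB k hk2]; exact h i hi
      unfold goodA goodB
      rw [hall, qb_eq_qbB k hk2]
      rcases Bool.eq_false_or_eq_true ((List.range k.toNat).all (fun i => qbB k (n - i))) with hb | hb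
      · rw [hb, Bool.and_true]
        rw [List.all_eq_true] at hb
        have := hb 0 (by rw [List.mem_range]; omega)
        rw [Nat.sub_zero] at this
        exact this
      · rw [hb, Bool.and_false]
    rw [hgood]
  · by_cases hk1 : k = 1
    · have hN : N < 2 := by
        rcases (show k ≠ 1 ∨ N < 2 by
          by_contra hcon
          push Not at hcon
          exact hD (Or.inr ⟨hcon.1 ▸ hk1, by omega⟩)) with h | h
        · exact absurd hk1 h
        · exact h
      rw [A_char k hkne N, B_char k (by omega) N]
      rw [show (N - 1).toNat = 0 from by omega]
      rfl
    · have hk0 : k ≤ 0 := by omega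
      rw [A_zero k hk0 hkne N, B_nonpos k hk0 N]

theorem problem_047_changed : Claim_changed_problem_047 := by
  unfold Claim_changed_problem_047; decide

theorem problem_047_tight : Claim_exact_problem_047 := by
  intro k N _ hD
  rcases hD with hk | ⟨hk, hN⟩
  · subst hk
    rw [A_neg_one N, B_nonpos (-1) (by omega) N]
    omega
  · subst hk
    have hB : problem_047_alt 1 N = 2 := by
      unfold problem_047_alt
      rw [if_neg (by omega : ¬ N < 2)]
      show pvLoopB 1 (pvSpfOuter (N.toNat + 2) (Array.replicate (N.toNat + 1) 0) 2 N.toNat)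
        (PySem.List.pyRange 2 (N + 1) 1) 0 = 2
      rw [PySem.List.pyRange_one_cons (by omega : (2 : Int) < N + 1)]
      simp only [pvLoopB]
      have homega : (pvOmegaSpf (pvSpfOuter (N.toNat + 2) (Array.replicate (N.toNat + 1) 0) 2
          N.toNat) ((2 : Int).toNat) : Int) = 1 := by
        rw [show ((2 : Int).toNat) = 2 from rfl,
            spf_final N (by omega) 2 le_rfl (by omega)]
        rw [Nat.prime_two.primeFactors]
        simp
      rw [if_pos homega, if_pos (by omega : (0 : Int) + 1 = 1)]
      norm_num
    rw [hB, A_char 1 (by omega) N]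
    rcases hf : List.find? (goodA 1) (List.range' 2 (N - 1).toNat) with _ | n
    · simp
    · have hgood := List.find?_some hf
      have hqb : qb 1 n = true := by
        unfold goodA at hgood
        exact (Bool.and_eq_true_iff.mp hgood).1
      have hne : n ≠ 2 := by
        intro h
        subst h
        have h2 : Ffin 2 = 1 := (Ffin_eq_one_iff 2).mpr Nat.prime_two
        simp [qb, h2] at hqb
      show (n : Int) - 1 + 1 ≠ 2
      intro hcon
      have : (n : Int) = 2 := by omega
      exact hne (by exact_mod_cast this)
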